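-- pv_equiv track=rewrite | github.com/dStass/mathlib | library/plotter.py | extract_vectors_and_ranges
-- ===== SOURCE A (Python) =====
-- def extract_vectors_and_ranges(vectors):
--   range_x = [0,0]
--   range_y = [0,0]
--
--   xs = []
--   ys = []
--   for i in range(len(vectors)):
--     x = vectors[i][0]
--     y = vectors[i][1]
--     xs.append(x)
--     ys.append(y)
--
--     # set ranges
--     if x < range_x[0]:
--       range_x[0] = x
--     if x > range_x[1]:
--       range_x[1] = x
--
--     if y < range_y[0]:
--       range_y[0] = y
--     if y > range_y[1]:
--       range_y[1] = y
--   return [xs, ys, range_x, range_y]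
-- ===== SOURCE B (Python) =====
-- def extract_vectors_and_ranges(vectors):
--   xs = [v[0] for v in vectors]
--   ys = [v[1] for v in vectors]
--   range_x = [min([0] + xs), max([0] + xs)]
--   range_y = [min([0] + ys), max([0] + ys)]
--   return [xs, ys, range_x, range_y]
-- ===== Notes on version B (the rewrite author's own statement) =====
-- stated objective: simpler
-- what changed: Replaces the single fused loop that incrementally tracks four range bounds with two comprehensions for xs/ys plus built-in min/max reductions seeded with 0.
import Mathlib
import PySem

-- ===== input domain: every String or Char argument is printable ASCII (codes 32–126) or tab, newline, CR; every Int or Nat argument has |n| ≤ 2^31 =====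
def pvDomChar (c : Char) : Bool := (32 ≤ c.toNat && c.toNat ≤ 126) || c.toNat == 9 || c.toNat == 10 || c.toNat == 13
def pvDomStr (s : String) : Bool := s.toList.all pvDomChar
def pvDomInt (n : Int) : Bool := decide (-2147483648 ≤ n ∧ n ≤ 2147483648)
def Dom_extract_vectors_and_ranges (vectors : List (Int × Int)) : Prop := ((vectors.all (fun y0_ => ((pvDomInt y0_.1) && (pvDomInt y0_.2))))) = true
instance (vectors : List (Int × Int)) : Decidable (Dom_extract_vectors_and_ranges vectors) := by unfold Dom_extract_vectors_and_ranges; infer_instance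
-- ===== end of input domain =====

-- ===== PORT A =====
-- Fused loop: appends x/y and updates the four range bounds incrementally, as in A.
def extract_vectors_and_ranges (vectors : List (Int × Int)) : List (List Int) :=
  let st := vectors.foldl
    (fun (s : List Int × List Int × Int × Int × Int × Int) v =>
      let x := v.1
      let y := v.2
      (s.1 ++ [x], s.2.1 ++ [y],
       (if x < s.2.2.1 then x else s.2.2.1),
       (if x > s.2.2.2.1 then x else s.2.2.2.1),
       (if y < s.2.2.2.2.1 then y else s.2.2.2.2.1),
       (if y > s.2.2.2.2.2 then y else s.2.2.2.2.2)))
    ([], [], 0, 0, 0, 0)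
  [st.1, st.2.1, [st.2.2.1, st.2.2.2.1], [st.2.2.2.2.1, st.2.2.2.2.2]]

-- ===== PORT B =====
-- B: comprehensions for xs/ys, then min/max reductions over 0 :: list (Python min([0]+xs)).
def extract_vectors_and_ranges_alt (vectors : List (Int × Int)) : List (List Int) :=
  let xs := vectors.map (fun v => v.1)
  let ys := vectors.map (fun v => v.2)
  [xs, ys,
   [xs.foldl min 0, xs.foldl max 0],
   [ys.foldl min 0, ys.foldl max 0]]

-- ===== PRECONDITION & SPEC =====
def Spec_extract_vectors_and_ranges (vectors : List (Int × Int)) (out : List (List Int)) : Prop := out = extract_vectors_and_ranges_alt vectors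
instance (vectors : List (Int × Int)) (out : List (List Int)) : Decidable (Spec_extract_vectors_and_ranges vectors out) := by unfold Spec_extract_vectors_and_ranges; infer_instance

-- ===== CLAIM (what is proved, stated in full; the proofs are below) =====
def Claim_equal_extract_vectors_and_ranges : Prop := ∀ (vectors : List (Int × Int)), Dom_extract_vectors_and_ranges vectors → Spec_extract_vectors_and_ranges vectors (extract_vectors_and_ranges vectors)

-- ===== LEMMAS AND PROOFS =====

-- ===== VERDICT (by name: the statement is the Claim_ definition above) =====
lemma evr_fold (vectors : List (Int × Int)) (xs0 ys0 : List Int) (a b c d : Int) :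
    vectors.foldl
      (fun (s : List Int × List Int × Int × Int × Int × Int) v =>
        let x := v.1
        let y := v.2
        (s.1 ++ [x], s.2.1 ++ [y],
         (if x < s.2.2.1 then x else s.2.2.1),
         (if x > s.2.2.2.1 then x else s.2.2.2.1),
         (if y < s.2.2.2.2.1 then y else s.2.2.2.2.1),
         (if y > s.2.2.2.2.2 then y else s.2.2.2.2.2)))
      (xs0, ys0, a, b, c, d)
    = (xs0 ++ vectors.map (fun v => v.1), ys0 ++ vectors.map (fun v => v.2),
       (vectors.map (fun v => v.1)).foldl min a,
       (vectors.map (fun v => v.1)).foldl max b,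
       (vectors.map (fun v => v.2)).foldl min c,
       (vectors.map (fun v => v.2)).foldl max d) := by
  induction vectors generalizing xs0 ys0 a b c d with
  | nil => simp
  | cons v t ih =>
      simp only [List.foldl_cons, List.map_cons, ih]
      have h1 : (if v.1 < a then v.1 else a) = min a v.1 := by
        simp [min_def]; omega
      have h2 : (if v.1 > b then v.1 else b) = max b v.1 := by
        simp [max_def]; omega
      have h3 : (if v.2 < c then v.2 else c) = min c v.2 := by
        simp [min_def]; omega
      have h4 : (if v.2 > d then v.2 else d) = max d v.2 := by
        simp [max_def]; omega
      simp [h1, h2, h3, h4]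

theorem extract_vectors_and_ranges_spec : Claim_equal_extract_vectors_and_ranges := by
  intro vectors _
  show extract_vectors_and_ranges vectors = extract_vectors_and_ranges_alt vectors
  simp [extract_vectors_and_ranges, extract_vectors_and_ranges_alt, evr_fold]
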